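-- pv_equiv track=rewrite | github.com/HaileyTQuach/FSLChatbot | src/app.py | load_conversation_map
-- ===== SOURCE A (Python) =====
-- def load_conversation_map(conversation_list):
--     """ ... """
--
--     output = {}
--
--     key = None
--     value = None
--
--     for i, line in enumerate(conversation_list):
--         if i % 2 == 0:
--             value = line
--         else:
--             key = line
--
--         if key is not None and value is not None:
--             output[key] = value
--             key = None
--             value = None
--
--
--     return output
-- ===== SOURCE B (Python) =====
-- def load_conversation_map(conversation_list):
--     # keys are the odd-indexed lines, values the even-indexed ones just before them;
--     # zip truncates a trailing unmatched value, dict keeps last value on duplicate keys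
--     return dict(zip(conversation_list[1::2], conversation_list[0::2]))
-- ===== Notes on version B (the rewrite author's own statement) =====
-- stated objective: simpler
-- what changed: Replaced A's indexed loop with parity tests, two None-sentinel state variables and reset logic by a single expression zipping the odd-indexed slice (keys) with the even-indexed slice (values) into a dict.
import Mathlib
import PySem

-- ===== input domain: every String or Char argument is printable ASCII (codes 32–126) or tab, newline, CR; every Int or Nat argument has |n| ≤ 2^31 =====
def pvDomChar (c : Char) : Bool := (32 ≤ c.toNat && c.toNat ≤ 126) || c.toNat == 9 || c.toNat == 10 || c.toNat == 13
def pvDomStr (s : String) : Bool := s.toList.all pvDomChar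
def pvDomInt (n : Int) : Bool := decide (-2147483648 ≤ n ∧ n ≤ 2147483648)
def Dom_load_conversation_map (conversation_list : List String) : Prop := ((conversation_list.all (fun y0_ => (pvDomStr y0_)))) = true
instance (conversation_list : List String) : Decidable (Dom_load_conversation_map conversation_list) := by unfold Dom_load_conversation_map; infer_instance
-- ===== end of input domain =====

-- Header: B replaces A's indexed loop with None-sentinel state variables by one expression
-- zipping the odd-indexed slice (keys) with the even-indexed slice (values) into a dict (objective: simpler).

-- ===== PORT A =====
-- one loop step of A's for-loop: state is (output, key, value); in ported lists a
-- Python `None` in key/value is Option.none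
def pvStepA (st : PySem.Dict String String × Option String × Option String)
    (p : Int × String) : PySem.Dict String String × Option String × Option String :=
  let value := if p.1 % 2 == 0 then some p.2 else st.2.2
  let key := if p.1 % 2 == 0 then st.2.1 else some p.2
  match key, value with
  | some k, some v => (st.1.insert k v, none, none)
  | _, _ => (st.1, key, value)

def load_conversation_map (conversation_list : List String) : List (String × String) :=
  ((PySem.List.enumerate conversation_list).foldl pvStepA
    (PySem.Dict.empty, none, none)).1.items

-- ===== PORT B =====
-- dict(zip(conversation_list[1::2], conversation_list[0::2]))
def load_conversation_map_alt (conversation_list : List String) : List (String × String) :=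
  (PySem.Dict.ofList
    (((PySem.List.slice? conversation_list (some 1) none 2).getD []).zip
      ((PySem.List.slice? conversation_list none none 2).getD []))).items

-- ===== PRECONDITION & SPEC =====
def Spec_load_conversation_map (conversation_list : List String) (out : List (String × String)) : Prop := out = load_conversation_map_alt conversation_list
instance (conversation_list : List String) (out : List (String × String)) : Decidable (Spec_load_conversation_map conversation_list out) := by unfold Spec_load_conversation_map; infer_instance

-- ===== CLAIM (what is proved, stated in full; the proofs are below) =====
def Claim_equal_load_conversation_map : Prop := ∀ (conversation_list : List String), Dom_load_conversation_map conversation_list → Spec_load_conversation_map conversation_list (load_conversation_map conversation_list)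

-- ===== LEMMAS AND PROOFS =====

-- elements at even positions 0,2,4,…
def pvEvens {α : Type} : List α → List α
  | [] => []
  | [a] => [a]
  | a :: _ :: r => a :: pvEvens r

-- the (key, value) pairs A inserts, in order
def pvPairs {α : Type} : List α → List (α × α)
  | [] => []
  | [_] => []
  | v :: k :: r => (k, v) :: pvPairs r

theorem pvFilterMap_stride {α : Type} (xs : List α) :
    List.filterMap (fun k => xs[2 * k]?) (List.range ((xs.length + 1) / 2)) = pvEvens xs := by
  induction xs using pvEvens.induct with
  | case1 => simp [pvEvens]
  | case2 a => simp [pvEvens]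
  | case3 a b r ih =>
    have hlen : ((a :: b :: r).length + 1) / 2 = (r.length + 1) / 2 + 1 := by
      simp; omega
    rw [hlen, List.range_succ_eq_map, List.filterMap_cons]
    simp only [List.filterMap_map]
    have hfun : ∀ k : Nat, ((a :: b :: r)[2 * (k + 1)]?) = r[2 * k]? := by
      intro k
      have h2 : 2 * (k + 1) = 2 * k + 1 + 1 := by omega
      rw [h2]
      simp
    simp only [Function.comp_def, hfun]
    simp [pvEvens, ih]

theorem pvSlice_evens {α : Type} (xs : List α) :
    PySem.List.slice? xs none none 2 = some (pvEvens xs) := by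
  rw [PySem.List.slice?]
  simp only [PySem.List.sliceIndices]
  norm_num
  have hcount : (if 0 < xs.length then (((xs.length:Int) + 2 - 1) / 2).toNat else 0)
      = (xs.length + 1) / 2 := by
    split <;> omega
  rw [hcount]
  rw [show (List.filterMap (fun k : Nat => xs[((2:Int) * (k:Int)).toNat]?) (List.range ((xs.length + 1) / 2)))
        = List.filterMap (fun k => xs[2 * k]?) (List.range ((xs.length + 1) / 2)) from by
      apply List.filterMap_congr; intro k _
      have h2 : ((2:Int) * (k:Int)).toNat = 2 * k := by omega
      rw [h2]]
  rw [pvFilterMap_stride]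

theorem pvSlice_odds {α : Type} (xs : List α) :
    PySem.List.slice? xs (some 1) none 2 = some (pvEvens xs.tail) := by
  rw [PySem.List.slice?]
  simp only [PySem.List.sliceIndices]
  norm_num
  cases xs with
  | nil => simp [pvEvens]
  | cons a r =>
    have hmin : min (1:Int) ((a :: r).length : Int) = 1 := by
      simp only [List.length_cons]; push_cast; omega
    simp only [hmin]
    have hcount : (if 1 < (a :: r).length then ((((a :: r).length:Int) - 1 + 2 - 1) / 2).toNat else 0)
        = (r.length + 1) / 2 := by
      simp only [List.length_cons]
      split <;> omega
    rw [hcount]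
    have hfun : ∀ k : Nat, (a :: r)[((1:Int) + 2 * (k:Int)).toNat]? = r[2 * k]? := by
      intro k
      have h1 : ((1:Int) + 2 * (k:Int)).toNat = 2 * k + 1 := by omega
      rw [h1]
      simp
    rw [show (List.filterMap (fun k : Nat => (a :: r)[((1:Int) + 2 * (k:Int)).toNat]?) (List.range ((r.length + 1) / 2)))
          = List.filterMap (fun k => r[2 * k]?) (List.range ((r.length + 1) / 2)) from by
        apply List.filterMap_congr; intro k _; exact hfun k]
    rw [pvFilterMap_stride]
    rfl

theorem pvZip_evens {α : Type} (xs : List α) :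
    (pvEvens xs.tail).zip (pvEvens xs) = pvPairs xs := by
  induction xs using pvPairs.induct with
  | case1 => simp [pvEvens, pvPairs]
  | case2 a => simp [pvEvens, pvPairs]
  | case3 v k r ih =>
    cases r with
    | nil => simp [pvEvens, pvPairs]
    | cons c r' =>
      simp only [List.tail_cons] at ih ⊢
      show ((k :: pvEvens r').zip (v :: pvEvens (c :: r'))) = (k, v) :: pvPairs (c :: r')
      simp only [List.zip_cons_cons]
      rw [← ih]

theorem pvLoopA (l : List String) (n : Int) (hn : n % 2 = 0) (d : PySem.Dict String String) :
    ((PySem.List.enumerate l n).foldl pvStepA (d, none, none)).1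
      = (pvPairs l).foldl (fun acc p => acc.insert p.1 p.2) d := by
  induction l using pvPairs.induct generalizing n d with
  | case1 => simp [PySem.List.enumerate, pvPairs]
  | case2 v =>
    have h0 : (n % 2 == 0) = true := by simpa using hn
    simp [PySem.List.enumerate, pvPairs, pvStepA, h0]
  | case3 v k r ih =>
    have h0 : (n % 2 == 0) = true := by simpa using hn
    have h1 : ((n + 1) % 2 == 0) = false := by
      simp only [beq_eq_false_iff_ne, ne_eq]
      omega
    rw [show PySem.List.enumerate (v :: k :: r) n
          = (n, v) :: (n + 1, k) :: PySem.List.enumerate r (n + 1 + 1) from by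
          simp [PySem.List.enumerate]]
    simp only [List.foldl_cons]
    rw [show pvStepA (d, none, none) (n, v) = (d, none, some v) from by
      simp [pvStepA, h0]]
    rw [show pvStepA (d, none, some v) (n + 1, k) = (d.insert k v, none, none) from by
      simp [pvStepA, h1]]
    rw [ih (n + 1 + 1) (by omega) (d.insert k v)]
    rfl

-- ===== VERDICT (by name: the statement is the Claim_ definition above) =====
theorem load_conversation_map_spec : Claim_equal_load_conversation_map := by
  intro l _
  unfold Spec_load_conversation_map load_conversation_map load_conversation_map_alt
  rw [pvSlice_evens, pvSlice_odds]
  simp only [Option.getD_some]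
  rw [pvZip_evens, pvLoopA l 0 (by decide) PySem.Dict.empty]
  rfl
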